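-- pv_equiv track=rewrite | github.com/YoungTeurus/PTBot | chat/ChatMessagePreprocessor.py | splitMessageAndAddPrefix
-- ===== SOURCE A (Python) =====
-- NEXT_LINE_SYMBOL = "-"
--
-- def splitMessageAndAddPrefix(message: str, prefix: str, limit: int) -> list[str]:
--     resultMessages = []
--     remainingMessage = message
--     while len(remainingMessage) > limit:
--         partToSend = remainingMessage[: limit + 1]
--         resultMessages.append(partToSend)
--         # Everything after 'partToSend' is remaining:
--         remainingMessage = NEXT_LINE_SYMBOL + remainingMessage[limit + 1:]
--     resultMessages.append(remainingMessage)
--     resultMessages[0] = prefix + resultMessages[0]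
--     return resultMessages
-- ===== SOURCE B (Python) =====
-- NEXT_LINE_SYMBOL = "-"
--
-- def splitMessageAndAddPrefix(message: str, prefix: str, limit: int) -> list[str]:
--     n = len(message)
--     if n <= limit:
--         return [prefix + message]
--     # single pass over chunk boundaries in the original string; no re-slicing of the remainder
--     chunks = [prefix + message[: limit + 1]]
--     i = limit + 1
--     while n - i > limit - 1:
--         chunks.append(NEXT_LINE_SYMBOL + message[i : i + limit])
--         i += limit
--     chunks.append(NEXT_LINE_SYMBOL + message[i:])
--     return chunks
-- ===== Notes on version B (the rewrite author's own statement) =====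
-- stated objective: faster
-- what changed: B computes chunk boundaries as indices into the original string in one pass instead of A's repeated re-slicing and rebuilding of the shrinking remainder string.
import Mathlib
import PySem

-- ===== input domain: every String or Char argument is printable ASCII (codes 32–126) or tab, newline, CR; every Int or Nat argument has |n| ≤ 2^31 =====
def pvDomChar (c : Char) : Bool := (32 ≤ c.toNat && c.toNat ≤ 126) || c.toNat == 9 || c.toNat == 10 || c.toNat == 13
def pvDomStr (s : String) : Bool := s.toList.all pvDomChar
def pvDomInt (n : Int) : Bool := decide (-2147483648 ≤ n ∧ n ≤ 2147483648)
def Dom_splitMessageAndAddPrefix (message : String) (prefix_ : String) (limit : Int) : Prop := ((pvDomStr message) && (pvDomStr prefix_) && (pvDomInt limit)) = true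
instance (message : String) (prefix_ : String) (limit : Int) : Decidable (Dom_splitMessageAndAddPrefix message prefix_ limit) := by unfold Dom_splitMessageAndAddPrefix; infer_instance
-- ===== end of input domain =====

-- B replaces A's repeated re-slicing and rebuilding of the shrinking remainder ("-" + rest each
-- round) by one pass over chunk boundary indices into the original string (each character copied once).

-- ===== PORT A =====
-- A's while loop over the shrinking remainder; fuel (message length + 1) only makes it total,
-- under Pre_ (limit ≥ 1, or the loop never runs) it is never exhausted.
def pvGoA (fuel : Nat) (rem : List Char) (limit : Int) : List (List Char) :=
  match fuel with
  | 0 => [rem]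
  | f + 1 =>
    if (rem.length : Int) > limit then
      PySem.List.slice rem none (some (limit + 1)) ::
        pvGoA f ('-' :: PySem.List.slice rem (some (limit + 1)) none) limit
    else [rem]

def splitMessageAndAddPrefix (message : String) (prefix_ : String) (limit : Int) : List String :=
  match pvGoA (message.toList.length + 1) message.toList limit with
  | [] => []  -- unreachable: pvGoA always returns a nonempty list
  | c :: rest => String.ofList (prefix_.toList ++ c) :: rest.map String.ofList

-- ===== PORT B =====
-- B's while loop: i walks the chunk start indices of the ORIGINAL message; fuel only for totality.
def pvGoB (fuel : Nat) (msg : List Char) (n : Int) (limit : Int) (i : Int) : List (List Char) :=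
  match fuel with
  | 0 => ['-' :: PySem.List.slice msg (some i) none]
  | f + 1 =>
    if n - i > limit - 1 then
      ('-' :: PySem.List.slice msg (some i) (some (i + limit))) ::
        pvGoB f msg n limit (i + limit)
    else ['-' :: PySem.List.slice msg (some i) none]

def splitMessageAndAddPrefix_alt (message : String) (prefix_ : String) (limit : Int) : List String :=
  let msg := message.toList
  let n : Int := msg.length
  if n ≤ limit then [String.ofList (prefix_.toList ++ msg)]
  else
    String.ofList (prefix_.toList ++ PySem.List.slice msg none (some (limit + 1))) ::
      (pvGoB msg.length msg n limit (limit + 1)).map String.ofList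

-- ===== PRECONDITION & SPEC =====
-- Pre_ excludes exactly the inputs on which A's while loop never terminates (limit ≤ 0 with a
-- message longer than limit: the remainder's length never shrinks), i.e. A returns no value there.
def Pre_splitMessageAndAddPrefix (message : String) (prefix_ : String) (limit : Int) : Prop :=
  1 ≤ limit ∨ (message.toList.length : Int) ≤ limit
instance (message : String) (prefix_ : String) (limit : Int) : Decidable (Pre_splitMessageAndAddPrefix message prefix_ limit) := by unfold Pre_splitMessageAndAddPrefix; infer_instance

def pvWitness_splitMessageAndAddPrefix : String × String × Int := ("abcdefgh", "P:", 3)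

def Spec_splitMessageAndAddPrefix (message : String) (prefix_ : String) (limit : Int) (out : List String) : Prop := out = splitMessageAndAddPrefix_alt message prefix_ limit
instance (message : String) (prefix_ : String) (limit : Int) (out : List String) : Decidable (Spec_splitMessageAndAddPrefix message prefix_ limit out) := by unfold Spec_splitMessageAndAddPrefix; infer_instance

-- ===== CLAIM (what is proved, stated in full; the proofs are below) =====
def Claim_equal_splitMessageAndAddPrefix : Prop := ∀ (message : String) (prefix_ : String) (limit : Int), Dom_splitMessageAndAddPrefix message prefix_ limit → Pre_splitMessageAndAddPrefix message prefix_ limit → Spec_splitMessageAndAddPrefix message prefix_ limit (splitMessageAndAddPrefix message prefix_ limit)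

-- ===== LEMMAS AND PROOFS =====

-- With enough fuel on both sides, A's loop on the remainder '-' :: msg.drop i.toNat computes
-- exactly B's loop at boundary index i.
theorem pvGoA_eq_pvGoB (msg : List Char) (l : Int) (hl : 1 ≤ l) :
    ∀ (fA fB : Nat) (i : Int), 0 ≤ i → i ≤ (msg.length : Int) →
      msg.length - i.toNat < fA → msg.length - i.toNat < fB →
      pvGoA fA ('-' :: msg.drop i.toNat) l = pvGoB fB msg (msg.length : Int) l i := by
  intro fA
  induction fA with
  | zero => intro fB i _ _ hfa _; omega
  | succ f ih =>
    intro fB i hi0 hin hfa hfb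
    match fB with
    | 0 => omega
    | fb + 1 =>
      have hlen : ((msg.drop i.toNat).length : Int) = (msg.length : Int) - i := by
        simp [List.length_drop]; omega
      simp only [pvGoA, pvGoB, List.length_cons]
      have hcond : ((((msg.drop i.toNat).length : Nat) + 1 : Nat) : Int) > l ↔
          (msg.length : Int) - i > l - 1 := by
        push_cast
        omega
      by_cases h : (msg.length : Int) - i > l - 1
      · rw [if_pos (by push_cast at hcond ⊢; omega), if_pos h]
        have hslice1 : PySem.List.slice ('-' :: msg.drop i.toNat) none (some (l + 1))
            = '-' :: (msg.drop i.toNat).take l.toNat := by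
          rw [PySem.List.slice_to _ (by omega)]
          have : (l + 1).toNat = l.toNat + 1 := by omega
          rw [this, List.take_succ_cons]
        have hslice2 : PySem.List.slice msg (some i) (some (i + l))
            = (msg.drop i.toNat).take l.toNat := by
          rw [PySem.List.slice_toNat _ (by omega) (by omega)]
          congr 1
          omega
        have hslice3 : PySem.List.slice ('-' :: msg.drop i.toNat) (some (l + 1)) none
            = msg.drop (i + l).toNat := by
          rw [PySem.List.slice_from _ (by omega)]
          have : (l + 1).toNat = l.toNat + 1 := by omega
          rw [this, List.drop_succ_cons, List.drop_drop]
          congr 1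
          omega
        rw [hslice1, hslice2, hslice3]
        congr 1
        exact ih fb (i + l) (by omega) (by omega) (by omega) (by omega)
      · rw [if_neg (by push_cast at hcond ⊢; omega), if_neg h]
        rw [PySem.List.slice_from _ hi0]

theorem splitMessageAndAddPrefix_spec_aux (message : String) (prefix_ : String) (limit : Int)
    (hpre : Pre_splitMessageAndAddPrefix message prefix_ limit) :
    splitMessageAndAddPrefix message prefix_ limit = splitMessageAndAddPrefix_alt message prefix_ limit := by
  unfold splitMessageAndAddPrefix splitMessageAndAddPrefix_alt
  set msg := message.toList with hmsg
  simp only [pvGoA]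
  by_cases hle : (msg.length : Int) ≤ limit
  · -- the loop never runs on either side
    rw [if_neg (by omega : ¬ ((msg.length : Int) > limit)), if_pos hle]
    rfl
  · have hl : 1 ≤ limit := by
      rcases hpre with h | h
      · exact h
      · rw [← hmsg] at h; exact absurd h hle
    rw [if_pos (by omega : ((msg.length : Int) > limit)), if_neg hle]
    dsimp only
    congr 1
    rw [PySem.List.slice_from _ (by omega : (0:Int) ≤ limit + 1)]
    congr 1
    exact pvGoA_eq_pvGoB msg limit hl msg.length msg.length (limit + 1)
      (by omega) (by omega) (by omega) (by omega)

-- ===== VERDICT (by name: the statement is the Claim_ definition above) =====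
theorem splitMessageAndAddPrefix_spec : Claim_equal_splitMessageAndAddPrefix := by
  intro message prefix_ limit _ hpre
  exact splitMessageAndAddPrefix_spec_aux message prefix_ limit hpre
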